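-- pv_equiv track=rewrite | github.com/MalinovVK/HomeWork_Malinov | HW13.py | quantity
-- ===== SOURCE A (Python) =====
-- def quantity(first_num):
--     quantity = 0
--     for i in range(1, 20 + 1):
--         for j in range(1, 20 + 1):
--             if first_num % (i+j) == 0 and i != j:
--                 quantity += 1
--     quantity_ = quantity/2
--     quantity_ = int(quantity_)
--     return quantity_
-- ===== SOURCE B (Python) =====
-- def quantity(first_num):
--     # Single pass over the possible sums s = i + j (i, j in 1..20), using a
--     # closed-form count of ordered pairs (i, j), i != j, with that sum.
--     total = 0
--     for s in range(2, 41):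
--         lo = 1 if s - 20 < 1 else s - 20
--         hi = 20 if s - 1 > 20 else s - 1
--         cnt = hi - lo + 1
--         if s % 2 == 0:
--             cnt -= 1  # drop the diagonal pair (s//2, s//2)
--         if first_num % s == 0:
--             total += cnt
--     return total // 2
-- ===== Notes on version B (the rewrite author's own statement) =====
-- stated objective: alternative
-- what changed: Replaced the nested scan over all ordered pairs (i,j) with a single pass over the possible sums s, adding a closed-form count of distinct ordered pairs with each sum.
import Mathlib
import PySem

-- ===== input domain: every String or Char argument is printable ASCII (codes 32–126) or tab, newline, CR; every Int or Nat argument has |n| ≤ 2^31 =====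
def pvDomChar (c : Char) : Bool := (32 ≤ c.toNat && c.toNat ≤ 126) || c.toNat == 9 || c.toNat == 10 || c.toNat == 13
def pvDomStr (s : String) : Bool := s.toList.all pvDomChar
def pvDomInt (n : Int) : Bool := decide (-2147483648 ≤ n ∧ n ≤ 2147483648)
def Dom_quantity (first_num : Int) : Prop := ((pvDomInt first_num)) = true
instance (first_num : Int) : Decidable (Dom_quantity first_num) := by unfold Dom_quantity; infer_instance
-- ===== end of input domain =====

-- B replaces A's nested pair scan by a single pass over the possible sums with a
-- closed-form pair count (objective: alternative algorithm, fewer iterations).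

-- ===== PORT A =====
-- the final int(quantity/2): the accumulator is a nonnegative count ≤ 380, so the float
-- division is exact and int() truncation equals floor division by 2; ported as floordiv.
def quantity (first_num : Int) : Int :=
  let q : Int := (PySem.List.pyRange 1 21 1).foldl (fun acc i =>
    (PySem.List.pyRange 1 21 1).foldl (fun acc j =>
      if PySem.Int.mod first_num (i + j) = 0 ∧ i ≠ j then acc + 1 else acc) acc) 0
  PySem.Int.floordiv q 2

-- ===== PORT B =====
def quantity_alt (first_num : Int) : Int :=
  let total : Int := (PySem.List.pyRange 2 41 1).foldl (fun acc s =>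
    let lo : Int := if s - 20 < 1 then 1 else s - 20
    let hi : Int := if s - 1 > 20 then 20 else s - 1
    let cnt0 : Int := hi - lo + 1
    let cnt : Int := if PySem.Int.mod s 2 = 0 then cnt0 - 1 else cnt0
    if PySem.Int.mod first_num s = 0 then acc + cnt else acc) 0
  PySem.Int.floordiv total 2

-- ===== PRECONDITION & SPEC =====
def Spec_quantity (first_num : Int) (out : Int) : Prop := out = quantity_alt first_num
instance (first_num : Int) (out : Int) : Decidable (Spec_quantity first_num out) := by unfold Spec_quantity; infer_instance

-- ===== CLAIM (what is proved, stated in full; the proofs are below) =====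
def Claim_equal_quantity : Prop := ∀ (first_num : Int), Dom_quantity first_num → Spec_quantity first_num (quantity first_num)

-- ===== LEMMAS AND PROOFS =====

-- B's per-sum pair count, as a function (matches the let-bindings in quantity_alt)
def cntB (s : Int) : Int :=
  let lo : Int := if s - 20 < 1 then 1 else s - 20
  let hi : Int := if s - 1 > 20 then 20 else s - 1
  let cnt0 : Int := hi - lo + 1
  if PySem.Int.mod s 2 = 0 then cnt0 - 1 else cnt0

-- the list of ordered pairs (i,j), i,j ∈ 1..20, i ≠ j, that A's nested loop counts
def pairsNE : List (Int × Int) :=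
  ((PySem.List.pyRange 1 21 1).flatMap (fun i =>
    (PySem.List.pyRange 1 21 1).map (fun j => (i, j)))).filter (fun x => x.1 ≠ x.2)

-- a counted-conditional foldl is the init plus a sum of if-terms
theorem foldl_ite_add {α : Type} (f : α → Int) (C : α → Prop) [DecidablePred C] :
    ∀ (l : List α) (acc : Int),
      l.foldl (fun a x => if C x then a + f x else a) acc
        = acc + (l.map (fun x => if C x then f x else 0)).sum := by
  intro l
  induction l with
  | nil => intro acc; simp
  | cons x l ih =>
    intro acc
    simp only [List.foldl_cons, List.map_cons, List.sum_cons, ih]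
    split_ifs <;> ring

-- sum of an if-guarded map equals the sum of the map over the filtered list
theorem sum_map_ite_filter {α : Type} (p : α → Prop) [DecidablePred p] (f : α → Int) :
    ∀ (l : List α),
      (l.map (fun x => if p x then f x else 0)).sum
        = ((l.filter (fun x => decide (p x))).map f).sum := by
  intro l
  induction l with
  | nil => simp
  | cons x l ih =>
    by_cases h : p x <;> simp [List.filter_cons, h, ih]

-- picking out one value of a nodup list by an if
theorem sum_map_ite_eq (dd : Int → Int) (c : Int) :
    ∀ (l : List Int), l.Nodup → c ∈ l →
      (l.map (fun s => if c = s then dd s else 0)).sum = dd c := by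
  intro l
  induction l with
  | nil => intro _ h; simp at h
  | cons x l ih =>
    intro hnd hm
    rcases List.mem_cons.mp hm with h | h
    · subst h
      have hz : (List.map (fun s => if c = s then dd s else 0) l).sum = 0 := by
        apply List.sum_eq_zero
        intro y hy
        rcases List.mem_map.mp hy with ⟨s, hs, rfl⟩
        have hne : c ≠ s := fun h => (List.nodup_cons.mp hnd).1 (h ▸ hs)
        simp [hne]
      simp [hz]
    · have hcx : c ≠ x := by rintro rfl; exact (List.nodup_cons.mp hnd).1 h
      simp [List.map_cons, List.sum_cons, hcx, ih (List.nodup_cons.mp hnd).2 h]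

-- regrouping a sum of dd ∘ g over a list by the (finitely many) values of g
theorem sum_map_eq_sum_countP {α : Type} (g : α → Int) (dd : Int → Int)
    (r : List Int) (hnd : r.Nodup) :
    ∀ (l : List α), (∀ x ∈ l, g x ∈ r) →
      (l.map (fun x => dd (g x))).sum
        = (r.map (fun s => ((l.countP (fun x => g x == s) : Nat) : Int) * dd s)).sum := by
  intro l
  induction l with
  | nil => intro _; simp
  | cons x l ih =>
    intro hmem
    have hx : g x ∈ r := hmem x (List.mem_cons_self ..)
    have hrest : ∀ y ∈ l, g y ∈ r := fun y hy => hmem y (List.mem_cons_of_mem _ hy)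
    simp only [List.map_cons, List.sum_cons, ih hrest]
    have hsplit : ∀ s : Int,
        ((((x :: l).countP (fun y => g y == s) : Nat)) : Int) * dd s
          = (if g x = s then dd s else 0) + ((l.countP (fun y => g y == s) : Nat) : Int) * dd s := by
      intro s
      by_cases h : g x = s <;> simp [List.countP_cons, h] <;> push_cast <;> ring
    calc dd (g x) + (r.map (fun s => ((l.countP (fun y => g y == s) : Nat) : Int) * dd s)).sum
        = (r.map (fun s => if g x = s then dd s else 0)).sum
            + (r.map (fun s => ((l.countP (fun y => g y == s) : Nat) : Int) * dd s)).sum := by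
          rw [sum_map_ite_eq dd (g x) r hnd hx]
      _ = (r.map (fun s => (((x :: l).countP (fun y => g y == s) : Nat) : Int) * dd s)).sum := by
          rw [← List.sum_map_add]
          exact (List.map_congr_left (fun s _ => (hsplit s).symm)) ▸ rfl
  -- note: last step rewrites pointwise with hsplit

-- the concrete coefficient facts: every pair sum lies in 2..40, and the fiber counts match cntB
set_option maxRecDepth 100000 in
theorem pairsNE_sums_mem : ∀ x ∈ pairsNE, x.1 + x.2 ∈ PySem.List.pyRange 2 41 1 := by decide

set_option maxRecDepth 100000 in
theorem pairsNE_counts : ∀ s ∈ PySem.List.pyRange 2 41 1,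
    ((pairsNE.countP (fun x => x.1 + x.2 == s) : Nat) : Int) = cntB s := by decide

set_option maxRecDepth 100000 in
theorem range_nodup : (PySem.List.pyRange 2 41 1).Nodup := by decide

-- the two accumulators agree
-- sum of a flatMap is the sum of the per-element sums
theorem sum_flatMap_int {α : Type} (f : α → List Int) :
    ∀ (l : List α), ((l.flatMap f).sum) = (l.map (fun x => (f x).sum)).sum := by
  intro l
  induction l with
  | nil => simp
  | cons x l ih => simp [List.flatMap_cons, ih]

theorem acc_eq (n : Int) :
    (PySem.List.pyRange 1 21 1).foldl (fun acc i =>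
      (PySem.List.pyRange 1 21 1).foldl (fun acc j =>
        if PySem.Int.mod n (i + j) = 0 ∧ i ≠ j then acc + 1 else acc) acc) 0
    = (PySem.List.pyRange 2 41 1).foldl (fun acc s =>
        let lo : Int := if s - 20 < 1 then 1 else s - 20
        let hi : Int := if s - 1 > 20 then 20 else s - 1
        let cnt0 : Int := hi - lo + 1
        let cnt : Int := if PySem.Int.mod s 2 = 0 then cnt0 - 1 else cnt0
        if PySem.Int.mod n s = 0 then acc + cnt else acc) 0 := by
  have hinner : ∀ (i acc : Int),
      (PySem.List.pyRange 1 21 1).foldl (fun acc j =>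
        if PySem.Int.mod n (i + j) = 0 ∧ i ≠ j then acc + 1 else acc) acc
      = acc + ((PySem.List.pyRange 1 21 1).map (fun j =>
          if PySem.Int.mod n (i + j) = 0 ∧ i ≠ j then (1 : Int) else 0)).sum := by
    intro i acc
    exact foldl_ite_add (fun _ => (1 : Int)) _ _ acc
  have hrhs :
      (PySem.List.pyRange 2 41 1).foldl (fun acc s =>
        let lo : Int := if s - 20 < 1 then 1 else s - 20
        let hi : Int := if s - 1 > 20 then 20 else s - 1
        let cnt0 : Int := hi - lo + 1
        let cnt : Int := if PySem.Int.mod s 2 = 0 then cnt0 - 1 else cnt0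
        if PySem.Int.mod n s = 0 then acc + cnt else acc) 0
      = (0 : Int) + ((PySem.List.pyRange 2 41 1).map (fun s =>
          if PySem.Int.mod n s = 0 then cntB s else 0)).sum :=
    foldl_ite_add cntB (fun s => PySem.Int.mod n s = 0) _ 0
  simp only [hinner]
  rw [PySem.List.foldl_add, hrhs, zero_add, zero_add]
  -- turn the nested sum into a sum over the flat pair list
  have hflat :
      ((PySem.List.pyRange 1 21 1).map (fun i =>
        ((PySem.List.pyRange 1 21 1).map (fun j =>
          if PySem.Int.mod n (i + j) = 0 ∧ i ≠ j then (1 : Int) else 0)).sum)).sum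
      = (((PySem.List.pyRange 1 21 1).flatMap (fun i =>
            (PySem.List.pyRange 1 21 1).map (fun j => (i, j)))).map (fun x =>
          if PySem.Int.mod n (x.1 + x.2) = 0 ∧ x.1 ≠ x.2 then (1 : Int) else 0)).sum := by
    rw [List.map_flatMap, sum_flatMap_int]
    simp [List.map_map, Function.comp_def]
  rw [hflat]
  -- split the conjunction: first test i ≠ j, inside it test divisibility
  have hsplit :
      (((PySem.List.pyRange 1 21 1).flatMap (fun i =>
          (PySem.List.pyRange 1 21 1).map (fun j => (i, j)))).map (fun x =>
        if PySem.Int.mod n (x.1 + x.2) = 0 ∧ x.1 ≠ x.2 then (1 : Int) else 0))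
      = (((PySem.List.pyRange 1 21 1).flatMap (fun i =>
          (PySem.List.pyRange 1 21 1).map (fun j => (i, j)))).map (fun x =>
        if x.1 ≠ x.2 then (if PySem.Int.mod n (x.1 + x.2) = 0 then (1 : Int) else 0) else 0)) := by
    apply List.map_congr_left
    intro x _
    by_cases h1 : PySem.Int.mod n (x.1 + x.2) = 0 <;> by_cases h2 : x.1 ≠ x.2 <;>
      simp [h1, h2]
  rw [hsplit,
    sum_map_ite_filter (fun x : Int × Int => x.1 ≠ x.2)
      (fun x => if PySem.Int.mod n (x.1 + x.2) = 0 then (1 : Int) else 0)]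
  have hfilter :
      (((PySem.List.pyRange 1 21 1).flatMap (fun i =>
          (PySem.List.pyRange 1 21 1).map (fun j => (i, j)))).filter
        (fun x => decide (x.1 ≠ x.2))) = pairsNE := rfl
  rw [hfilter,
    sum_map_eq_sum_countP (fun x : Int × Int => x.1 + x.2)
      (fun s => if PySem.Int.mod n s = 0 then (1 : Int) else 0)
      (PySem.List.pyRange 2 41 1) range_nodup pairsNE pairsNE_sums_mem]
  apply congrArg List.sum
  apply List.map_congr_left
  intro s hs
  rw [pairsNE_counts s hs]
  by_cases h : PySem.Int.mod n s = 0 <;> simp [h]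

theorem quantity_spec' (n : Int) : quantity n = quantity_alt n := by
  unfold quantity quantity_alt
  rw [acc_eq n]

-- ===== VERDICT (by name: the statement is the Claim_ definition above) =====
theorem quantity_spec : Claim_equal_quantity := by
  intro n _
  unfold Spec_quantity
  exact quantity_spec' n
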